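-- pv_equiv track=rewrite | github.com/Austin-High-AP-CS-Principles/11-2-public-private-key-quinn-skidmore | main.py | pick_e_d
-- ===== SOURCE A (Python) =====
-- def gcd(p,q):
--     while q != 0:
--         p, q = q, p%q
--     return p
--
-- def is_coprime(x, y):
--     return gcd(x, y) == 1
--
-- def calculate_N(p,q):
-- 	return p*q
--
-- def calculate_T(p,q):
-- 	return (p-1)*(q-1)
--
-- def pick_e_d(p,q):
-- 	t = calculate_T(p,q)
-- 	n = calculate_N(p,q)
-- 	e=0
-- 	d=0
-- 	e_value = 0
-- 	for e in range(t):
-- 		if(is_coprime(e,t) and is_coprime(e,n)):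
-- 			e_value = e
-- 	for d in range(400000, 100000000):
-- 		if((e_value * d) % t) == 1:
-- 			return [e_value,d]
-- ===== SOURCE B (Python) =====
-- def gcd(p, q):
--     while q != 0:
--         p, q = q, p % q
--     return p
--
--
-- def _ext_gcd(a, b):
--     # iterative extended Euclid: returns (g, x) with x*a === g (mod b0)
--     x0, x1 = 1, 0
--     while b != 0:
--         quot = a // b
--         a, b = b, a - quot * b
--         x0, x1 = x1, x0 - quot * x1
--     return a, x0
--
--
-- def pick_e_d(p, q):
--     t = (p - 1) * (q - 1)
--     n = p * q
--     # largest e in [0, t) coprime to both t and n: scan DOWN, stop at first hit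
--     e_value = 0
--     for e in range(t - 1, -1, -1):
--         if gcd(e, t) == 1 and gcd(e, n) == 1:
--             e_value = e
--             break
--     # smallest d >= 400000 with e_value*d === 1 (mod t), by modular inverse
--     g, x = _ext_gcd(e_value, t)
--     if g != 1:
--         return None
--     inv = x % t
--     d = 400000 + ((inv - 400000) % t)
--     if d < 100000000:
--         return [e_value, d]
--     return None
-- ===== Notes on version B (the rewrite author's own statement) =====
-- stated objective: faster
-- what changed: A scans ALL e in [0,t) keeping the last coprime hit and then linearly searches d over the whole range [400000,10^8); B scans e downward from t-1 stopping at the first coprime hit (the same maximum) and computes d directly as the smallest element >= 400000 of the residue class of the modular inverse of e, obtained by extended Euclid.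
-- outside the precondition, e.g. on pick_e_d(1, 5): A raises ZeroDivisionError, B returns None
import Mathlib
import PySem

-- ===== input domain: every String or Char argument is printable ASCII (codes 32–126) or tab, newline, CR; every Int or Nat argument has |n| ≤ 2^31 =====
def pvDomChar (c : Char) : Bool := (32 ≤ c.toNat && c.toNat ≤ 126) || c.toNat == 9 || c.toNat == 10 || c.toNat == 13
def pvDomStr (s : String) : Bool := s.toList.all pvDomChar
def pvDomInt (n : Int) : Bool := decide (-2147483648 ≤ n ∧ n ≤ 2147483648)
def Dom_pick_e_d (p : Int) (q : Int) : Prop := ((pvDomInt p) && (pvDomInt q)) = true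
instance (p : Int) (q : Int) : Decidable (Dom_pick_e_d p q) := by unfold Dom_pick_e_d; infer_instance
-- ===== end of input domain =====

-- B replaces A's full scan of [0,t) (keeping the last coprime e) by a downward scan stopping at the
-- first coprime e, and replaces A's linear search for d over [400000,10^8) by extended Euclid:
-- d is computed arithmetically from the modular inverse of e. Equivalence is about return values;
-- Python A returns None (no List) or raises outside Pre_, where both ports return [].

-- termination measure for the module's gcd (Python %: sign of the divisor, |a % b| < |b|)
theorem pyMod_natAbs_lt (a b : Int) (hb : b ≠ 0) : (PySem.Int.mod a b).natAbs < b.natAbs := by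
  rcases lt_or_gt_of_ne hb with h | h
  · have h1 := PySem.Int.mod_neg_bounds a h
    omega
  · have h1 := PySem.Int.mod_nonneg a h
    have h2 := PySem.Int.mod_lt a h
    omega

-- ===== PORT A =====
-- the module's gcd: while q != 0: p, q = q, p % q  (shared helper of both Pythons)
def pyGcd (a b : Int) : Int :=
  if h : b = 0 then a else pyGcd b (PySem.Int.mod a b)
termination_by b.natAbs
decreasing_by exact pyMod_natAbs_lt a b h

-- for e in range(t): if is_coprime(e,t) and is_coprime(e,n): e_value = e
def eLoopA (t n : Int) (e acc : Int) : Nat → Int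
  | 0 => acc
  | f+1 => eLoopA t n (e+1) (if pyGcd e t = 1 ∧ pyGcd e n = 1 then e else acc) f

-- for d in range(400000, 100000000): if (e_value*d) % t == 1: return [e_value, d]
-- ([] stands for Python's falling off the loop, i.e. returning None; outside Pre_)
def dLoopA (ev t : Int) (d : Int) : Nat → List Int
  | 0 => []
  | f+1 => if PySem.Int.mod (ev * d) t = 1 then [ev, d] else dLoopA ev t (d+1) f

def pick_e_d (p : Int) (q : Int) : List Int :=
  let t := (p-1)*(q-1)
  let n := p*q
  let e_value := eLoopA t n 0 0 t.toNat
  dLoopA e_value t 400000 99600000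

-- ===== PORT B =====
-- for e in range(t-1, -1, -1): first coprime hit, then break (else e_value = 0)
def eLoopB (t n : Int) (e : Int) : Nat → Int
  | 0 => 0
  | f+1 => if pyGcd e t = 1 ∧ pyGcd e n = 1 then e else eLoopB t n (e-1) f

-- _ext_gcd of Source B: while b != 0: q = a//b; a, b = b, a - q*b; x0, x1 = x1, x0 - q*x1
def extGcd (a b x0 x1 : Int) : Int × Int :=
  if h : b = 0 then (a, x0)
  else extGcd b (a - PySem.Int.floordiv a b * b) x1 (x0 - PySem.Int.floordiv a b * x1)
termination_by b.natAbs
decreasing_by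
  have hm : a - PySem.Int.floordiv a b * b = PySem.Int.mod a b := by
    have h2 := PySem.Int.floordiv_mul_add_mod a b
    linarith
  rw [hm]; exact pyMod_natAbs_lt a b h

def pick_e_d_alt (p : Int) (q : Int) : List Int :=
  let t := (p-1)*(q-1)
  let n := p*q
  let e_value := eLoopB t n (t-1) t.toNat
  let gx := extGcd e_value t 1 0
  if gx.1 = 1 then
    let inv := PySem.Int.mod gx.2 t
    let d := 400000 + PySem.Int.mod (inv - 400000) t
    if d < 100000000 then [e_value, d] else []
  else []

-- ===== PRECONDITION & SPEC =====
-- Pre_ holds exactly when Python A returns a list: it excludes t = (p-1)(q-1) <= 1 (A raises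
-- ZeroDivisionError at t = 0, otherwise returns None there) and inputs whose smallest valid d is
-- >= 10^8 (A falls off the d loop and returns None - not a value of the declared List type).
-- pvEmax t n is the largest e in [0,t) with gcd(e,t) = gcd(e,n) = 1 (A's e_value, in Int.gcd
-- terms; computed by descent from t-1 so that deciding Pre_ is cheap), and pvD0 is the smallest
-- d >= 400000 with e*d = 1 (mod t), obtained from the Bezout coefficient Int.gcdA.
def pvEmaxAux (t n : Int) (e : Int) : Nat → Int
  | 0 => 0
  | f+1 => if Int.gcd e t = 1 ∧ Int.gcd e n = 1 then e else pvEmaxAux t n (e-1) f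

def pvEmax (t n : Int) : Int := pvEmaxAux t n (t-1) t.toNat

def pvD0 (p q : Int) : Int :=
  400000 + (Int.gcdA (pvEmax ((p-1)*(q-1)) (p*q)) ((p-1)*(q-1)) % ((p-1)*(q-1)) - 400000)
              % ((p-1)*(q-1))

def Pre_pick_e_d (p : Int) (q : Int) : Prop :=
  2 ≤ (p-1)*(q-1) ∧ pvD0 p q < 100000000

instance (p : Int) (q : Int) : Decidable (Pre_pick_e_d p q) := by
  unfold Pre_pick_e_d; infer_instance

def pvWitness_pick_e_d : Int × Int := (3, 7)

def Spec_pick_e_d (p : Int) (q : Int) (out : List Int) : Prop := out = pick_e_d_alt p q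
instance (p : Int) (q : Int) (out : List Int) : Decidable (Spec_pick_e_d p q out) := by
  unfold Spec_pick_e_d; infer_instance

-- ===== CLAIM (what is proved, stated in full; the proofs are below) =====
def Claim_equal_pick_e_d : Prop :=
  ∀ (p : Int) (q : Int), Dom_pick_e_d p q → Pre_pick_e_d p q → Spec_pick_e_d p q (pick_e_d p q)

-- ===== LEMMAS AND PROOFS =====

theorem gcd_mod (a b : Int) : Int.gcd b (a % b) = Int.gcd a b := by
  conv_rhs => rw [Int.gcd_comm]
  rw [Int.emod_def, mul_comm]
  exact Int.gcd_sub_mul_right_right b a (a/b)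

theorem pyGcd_eq_gcd (a b : Int) (ha : 0 ≤ a) (hb : 0 ≤ b) : pyGcd a b = (Int.gcd a b : Int) := by
  rw [pyGcd]
  by_cases h : b = 0
  · simp [h, Int.natAbs_of_nonneg ha]
  · have hbpos : 0 < b := lt_of_le_of_ne hb (Ne.symm h)
    rw [dif_neg h, PySem.Int.mod_eq_emod_of_pos hbpos,
        pyGcd_eq_gcd b (a % b) hb (Int.emod_nonneg a h), gcd_mod]
termination_by b.natAbs
decreasing_by
  have hlt := pyMod_natAbs_lt a b h
  rwa [PySem.Int.mod_eq_emod_of_pos hbpos] at hlt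

theorem pyGcd_neg (a b : Int) (hb : b < 0) : pyGcd a b < 0 := by
  rw [pyGcd, dif_neg (by omega : ¬ b = 0)]
  by_cases hr : PySem.Int.mod a b = 0
  · rw [hr, pyGcd]; simpa using hb
  · exact pyGcd_neg b (PySem.Int.mod a b) (by have := PySem.Int.mod_neg_bounds a hb; omega)
termination_by b.natAbs
decreasing_by exact pyMod_natAbs_lt a b (by omega)

-- Python's coprime test, for 0 ≤ e and 2 ≤ t, in arithmetic terms
theorem cop_bridge (t n e : Int) (ht : 2 ≤ t) (he : 0 ≤ e) :
    (pyGcd e t = 1 ∧ pyGcd e n = 1) ↔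
      (Int.gcd e t = 1 ∧ 0 ≤ n ∧ Int.gcd e n = 1) := by
  rw [pyGcd_eq_gcd e t he (by omega)]
  by_cases hn : 0 ≤ n
  · rw [pyGcd_eq_gcd e n he hn]
    constructor
    · rintro ⟨h1, h2⟩; exact ⟨by exact_mod_cast h1, hn, by exact_mod_cast h2⟩
    · rintro ⟨h1, _, h2⟩; exact ⟨by exact_mod_cast h1, by exact_mod_cast h2⟩
  · have := pyGcd_neg e n (by omega)
    constructor
    · rintro ⟨_, h2⟩; omega
    · rintro ⟨_, h1, _⟩; omega

theorem eLoopA_no_match (t n : Int) :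
    ∀ (f : Nat) (e acc : Int),
      (∀ j, e ≤ j → j < e + f → ¬(pyGcd j t = 1 ∧ pyGcd j n = 1)) →
      eLoopA t n e acc f = acc := by
  intro f
  induction f with
  | zero => intro e acc _; rfl
  | succ f ih =>
    intro e acc hno
    simp only [eLoopA]
    rw [if_neg (hno e le_rfl (by push_cast; omega))]
    exact ih (e+1) acc (fun j h1 h2 => hno j (by omega) (by push_cast at h2 ⊢; omega))

theorem eLoopA_max (t n : Int) :
    ∀ (f : Nat) (e acc m : Int), e ≤ m → m < e + f →
      (pyGcd m t = 1 ∧ pyGcd m n = 1) →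
      (∀ j, m < j → j < e + f → ¬(pyGcd j t = 1 ∧ pyGcd j n = 1)) →
      eLoopA t n e acc f = m := by
  intro f
  induction f with
  | zero => intro e acc m h1 h2 _ _; push_cast at h2; omega
  | succ f ih =>
    intro e acc m h1 h2 hP hno
    simp only [eLoopA]
    by_cases hme : e + 1 ≤ m
    · exact ih (e+1) _ m hme (by push_cast at h2 ⊢; omega) hP
        (fun j hj1 hj2 => hno j hj1 (by push_cast at hj2 ⊢; omega))
    · have hem : m = e := by omega
      subst hem
      rw [if_pos hP]
      exact eLoopA_no_match t n f (m+1) m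
        (fun j hj1 hj2 => hno j (by omega) (by push_cast at hj2 ⊢; omega))

theorem eLoopB_found (t n : Int) :
    ∀ (f : Nat) (e m : Int), m ≤ e → e < m + f →
      (pyGcd m t = 1 ∧ pyGcd m n = 1) →
      (∀ j, m < j → j ≤ e → ¬(pyGcd j t = 1 ∧ pyGcd j n = 1)) →
      eLoopB t n e f = m := by
  intro f
  induction f with
  | zero => intro e m h1 h2 _ _; push_cast at h2; omega
  | succ f ih =>
    intro e m h1 h2 hP hno
    simp only [eLoopB]
    by_cases hme : m = e
    · subst hme; rw [if_pos hP]
    · rw [if_neg (hno e (by omega) le_rfl)]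
      exact ih (e-1) m (by omega) (by push_cast at h2 ⊢; omega) hP
        (fun j hj1 hj2 => hno j hj1 (by omega))

theorem dLoopA_found (ev t d0 : Int) (hd0 : PySem.Int.mod (ev * d0) t = 1) :
    ∀ (f : Nat) (d : Int), d ≤ d0 → d0 < d + f →
      (∀ j, d ≤ j → j < d0 → PySem.Int.mod (ev * j) t ≠ 1) →
      dLoopA ev t d f = [ev, d0] := by
  intro f
  induction f with
  | zero => intro d h1 h2 _; push_cast at h2; omega
  | succ f ih =>
    intro d h1 h2 hno
    simp only [dLoopA]
    by_cases hd : d = d0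
    · subst hd; rw [if_pos hd0]
    · rw [if_neg (hno d le_rfl (by omega))]
      exact ih (d+1) (by omega) (by push_cast at h2 ⊢; omega)
        (fun j hj1 hj2 => hno j (by omega) hj2)

theorem extGcd_fst (a b x0 x1 : Int) : (extGcd a b x0 x1).1 = pyGcd a b := by
  rw [extGcd, pyGcd]
  by_cases h : b = 0
  · simp [h]
  · rw [dif_neg h, dif_neg h, extGcd_fst b _ x1 _]
    congr 1
    have h2 := PySem.Int.floordiv_mul_add_mod a b; linarith
termination_by b.natAbs
decreasing_by
  have hm : a - PySem.Int.floordiv a b * b = PySem.Int.mod a b := by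
    have h2 := PySem.Int.floordiv_mul_add_mod a b; linarith
  rw [hm]; exact pyMod_natAbs_lt a b h

theorem extGcd_inv (E T a b x0 x1 : Int) (h0 : T ∣ (a - x0 * E)) (h1 : T ∣ (b - x1 * E)) :
    T ∣ ((extGcd a b x0 x1).1 - (extGcd a b x0 x1).2 * E) := by
  rw [extGcd]
  by_cases h : b = 0
  · simpa [h] using h0
  · rw [dif_neg h]
    refine extGcd_inv E T b _ x1 _ h1 ?_
    obtain ⟨k1, hk1⟩ := h0
    obtain ⟨k2, hk2⟩ := h1
    exact ⟨k1 - PySem.Int.floordiv a b * k2,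
      by linear_combination hk1 - PySem.Int.floordiv a b * hk2⟩
termination_by b.natAbs
decreasing_by
  have hm : a - PySem.Int.floordiv a b * b = PySem.Int.mod a b := by
    have h2 := PySem.Int.floordiv_mul_add_mod a b; linarith
  rw [hm]; exact pyMod_natAbs_lt a b h

theorem pvEmaxAux_found (t n : Int) :
    ∀ (f : Nat) (e m : Int), m ≤ e → e < m + f →
      (Int.gcd m t = 1 ∧ Int.gcd m n = 1) →
      (∀ j, m < j → j ≤ e → ¬(Int.gcd j t = 1 ∧ Int.gcd j n = 1)) →
      pvEmaxAux t n e f = m := by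
  intro f
  induction f with
  | zero => intro e m h1 h2 _ _; push_cast at h2; omega
  | succ f ih =>
    intro e m h1 h2 hP hno
    simp only [pvEmaxAux]
    by_cases hme : m = e
    · subst hme; rw [if_pos hP]
    · rw [if_neg (hno e (by omega) le_rfl)]
      exact ih (e-1) m (by omega) (by push_cast at h2 ⊢; omega) hP
        (fun j hj1 hj2 => hno j hj1 (by omega))

theorem n_nonneg_of_t (p q : Int) (ht : 2 ≤ (p-1)*(q-1)) : 0 ≤ p*q := by
  by_cases hp : 0 < p <;> by_cases hq : 0 < q
  · exact mul_nonneg (by omega) (by omega)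
  · exfalso
    nlinarith [mul_nonneg (show (0:Int) ≤ p-1 by omega) (show (0:Int) ≤ 1-q by omega)]
  · exfalso
    nlinarith [mul_nonneg (show (0:Int) ≤ 1-p by omega) (show (0:Int) ≤ q-1 by omega)]
  · nlinarith [mul_nonneg (show (0:Int) ≤ -p by omega) (show (0:Int) ≤ -q by omega)]

theorem main_eq (p q : Int) (h : Pre_pick_e_d p q) : pick_e_d p q = pick_e_d_alt p q := by
  obtain ⟨ht, hd0pre⟩ := h
  set t := (p-1)*(q-1) with htdef
  set n := p*q with hndef
  have htpos : (0:Int) < t := by omega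
  have htne : t ≠ 0 := by omega
  have htn : (t.toNat : Int) = t := Int.toNat_of_nonneg (by omega)
  have hn : 0 ≤ n := n_nonneg_of_t p q ht
  -- the largest coprime e exists (e = 1 always qualifies)
  have hone : (1:Int) ∈ (Finset.Ico (0:Int) t).filter
      (fun j => Int.gcd j t = 1 ∧ Int.gcd j n = 1) := by
    simp only [Finset.mem_filter, Finset.mem_Ico]
    refine ⟨⟨by omega, by omega⟩, by simp [Int.gcd], by simp [Int.gcd]⟩
  set S := (Finset.Ico (0:Int) t).filter
      (fun j => Int.gcd j t = 1 ∧ Int.gcd j n = 1) with hSdef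
  have hSne : S.Nonempty := ⟨1, hone⟩
  set m := S.max' hSne with hmdef
  have hmem2 : m ∈ (Finset.Ico (0:Int) t).filter
      (fun j => Int.gcd j t = 1 ∧ Int.gcd j n = 1) := S.max'_mem hSne
  obtain ⟨hmIco, hgmt, hgmn⟩ := Finset.mem_filter.mp hmem2
  obtain ⟨hm0, hmlt⟩ := Finset.mem_Ico.mp hmIco
  have hmmax : ∀ j, 0 ≤ j → j < t → (Int.gcd j t = 1 ∧ Int.gcd j n = 1) → j ≤ m := by
    intro j hj0 hjlt hPj
    exact S.le_max' j (Finset.mem_filter.mpr ⟨Finset.mem_Ico.mpr ⟨hj0, hjlt⟩, hPj⟩)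
  have hE : pvEmax t n = m := by
    rw [pvEmax]
    exact pvEmaxAux_found t n t.toNat (t-1) m (by omega) (by omega) ⟨hgmt, hgmn⟩
      (fun j hj1 hj2 hPj => by have := hmmax j (by omega) (by omega) hPj; omega)
  have hPe : pyGcd m t = 1 ∧ pyGcd m n = 1 := (cop_bridge t n m ht hm0).2 ⟨hgmt, hn, hgmn⟩
  have hnoAbove : ∀ j, m < j → j < t → ¬(pyGcd j t = 1 ∧ pyGcd j n = 1) := by
    intro j hj1 hj2 hP
    have hj0 : 0 ≤ j := by omega
    have hPj := (cop_bridge t n j ht hj0).1 hP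
    have := hmmax j hj0 hj2 ⟨hPj.1, hPj.2.2⟩
    omega
  have hA : eLoopA t n 0 0 t.toNat = m :=
    eLoopA_max t n t.toNat 0 0 m hm0 (by omega) hPe
      (fun j h1 h2 => hnoAbove j h1 (by omega))
  have hB : eLoopB t n (t-1) t.toNat = m :=
    eLoopB_found t n t.toNat (t-1) m (by omega) (by omega) hPe
      (fun j h1 h2 => hnoAbove j h1 (by omega))
  -- the extended-Euclid inverse of B
  have hg1 : (extGcd m t 1 0).1 = 1 := by
    rw [extGcd_fst, pyGcd_eq_gcd m t hm0 (by omega)]; exact_mod_cast hgmt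
  have hxdvd : t ∣ (1 - (extGcd m t 1 0).2 * m) := by
    have h9 := extGcd_inv m t m t 1 0 ⟨0, by ring⟩ ⟨1, by ring⟩
    rwa [hg1] at h9
  set x := (extGcd m t 1 0).2 with hxdef
  have hmodsub : ∀ y : Int, t ∣ (y - y % t) := fun y => ⟨y / t, by rw [Int.emod_def]; ring⟩
  set inv := PySem.Int.mod x t with hinvdef
  have hinve : inv = x % t := by rw [hinvdef, PySem.Int.mod_eq_emod_of_pos htpos]
  have hEinv : t ∣ (m * inv - 1) := by
    obtain ⟨k1, hk1⟩ := hxdvd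
    obtain ⟨k2, hk2⟩ : t ∣ (x - inv) := by rw [hinve]; exact hmodsub x
    exact ⟨-k1 - m * k2, by linear_combination -hk1 - m * hk2⟩
  set d0 := 400000 + PySem.Int.mod (inv - 400000) t with hd0def
  have hd0e : d0 = 400000 + (inv - 400000) % t := by
    rw [hd0def, PySem.Int.mod_eq_emod_of_pos htpos]
  have hd0lo : 400000 ≤ d0 := by
    have := Int.emod_nonneg (inv - 400000) htne
    omega
  have hd0hi : d0 < 400000 + t := by
    have := Int.emod_lt_of_pos (inv - 400000) htpos
    omega
  have hd0inv : t ∣ (d0 - inv) := by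
    obtain ⟨k, hk⟩ := hmodsub (inv - 400000)
    exact ⟨-k, by linear_combination hd0e - hk⟩
  have hEd0 : t ∣ (m * d0 - 1) := by
    obtain ⟨k1, hk1⟩ := hd0inv
    obtain ⟨k2, hk2⟩ := hEinv
    exact ⟨m * k1 + k2, by linear_combination m * hk1 + hk2⟩
  have hcong : ∀ y : Int, t ∣ (m * y - 1) → t ∣ (y - d0) := by
    intro y hy
    obtain ⟨k1, hk1⟩ := hy
    obtain ⟨k2, hk2⟩ := hEinv
    obtain ⟨k3, hk3⟩ := hd0inv
    exact ⟨inv * k1 - y * k2 - k3, by linear_combination inv * hk1 - y * hk2 - hk3⟩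
  have hwin : ∀ y : Int, 400000 ≤ y → y < 400000 + t → t ∣ (y - d0) → y = d0 := by
    intro y hy1 hy2 hdv
    have h0 : y - d0 = 0 := Int.eq_zero_of_abs_lt_dvd hdv (by rw [abs_lt]; omega)
    omega
  -- Pre_'s closed-form d equals B's d0, so d0 < 10^8
  have hd0small : d0 < 100000000 := by
    have hpre : pvD0 p q = 400000 + (Int.gcdA m t % t - 400000) % t := by
      rw [pvD0, ← htdef, ← hndef, hE]
    have hAdvd : t ∣ (m * Int.gcdA m t - 1) := by
      have hb := Int.gcd_eq_gcd_ab m t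
      rw [hgmt] at hb
      exact ⟨-Int.gcdB m t, by push_cast at hb; linear_combination -hb⟩
    have hAdvd2 : t ∣ (m * (Int.gcdA m t % t) - 1) := by
      obtain ⟨k1, hk1⟩ := hAdvd
      obtain ⟨k2, hk2⟩ := hmodsub (Int.gcdA m t)
      exact ⟨k1 - m * k2, by linear_combination hk1 - m * hk2⟩
    have hpredvd : t ∣ (pvD0 p q - d0) := by
      obtain ⟨k1, hk1⟩ := hAdvd2
      obtain ⟨k2, hk2⟩ := hmodsub (Int.gcdA m t % t - 400000)
      obtain ⟨k3, hk3⟩ := hcong (Int.gcdA m t % t) ⟨k1, hk1⟩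
      exact ⟨-k2 + k3, by linear_combination hpre - hk2 + hk3⟩
    have hprelo : 400000 ≤ pvD0 p q := by
      have := Int.emod_nonneg (Int.gcdA m t % t - 400000) htne
      omega
    have hprehi : pvD0 p q < 400000 + t := by
      have := Int.emod_lt_of_pos (Int.gcdA m t % t - 400000) htpos
      omega
    have := hwin (pvD0 p q) hprelo hprehi hpredvd
    omega
  have hd0mod : PySem.Int.mod (m * d0) t = 1 := by
    rw [PySem.Int.mod_eq_emod_of_pos htpos]
    obtain ⟨k, hk⟩ := hEd0
    have hrw : m * d0 = 1 + t * k := by linarith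
    rw [hrw, Int.add_mul_emod_self_left]
    exact Int.emod_eq_of_lt (by omega) (by omega)
  have hnosol : ∀ j, 400000 ≤ j → j < d0 → PySem.Int.mod (m * j) t ≠ 1 := by
    intro j hj1 hj2 hj
    rw [PySem.Int.mod_eq_emod_of_pos htpos] at hj
    have hjd : t ∣ (m * j - 1) := by
      obtain ⟨k, hk⟩ := hmodsub (m * j)
      rw [hj] at hk
      exact ⟨k, by linarith⟩
    have := hwin j hj1 (by omega) (hcong j hjd)
    omega
  show dLoopA (eLoopA t n 0 0 t.toNat) t 400000 99600000 = pick_e_d_alt p q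
  rw [hA, dLoopA_found m t d0 hd0mod 99600000 400000 (by omega) (by omega) hnosol]
  show _ = (if (extGcd (eLoopB t n (t-1) t.toNat) t 1 0).1 = 1 then _ else _)
  rw [hB, if_pos hg1, if_pos hd0small]

-- ===== VERDICT (by name: the statement is the Claim_ definition above) =====
theorem pick_e_d_spec : Claim_equal_pick_e_d := by
  intro p q _ hpre
  exact main_eq p q hpre
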